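-- pv_equiv track=rewrite | github.com/miliar/Code_Jam_Webscraper | solutions_python/solutions_year17_round1_nr1/535.py | handle_q_m_row
-- ===== SOURCE A (Python) =====
-- def handle_q_m_row(cake):
--     for r_i, r in enumerate(cake):
--         if '?' in r:
--             if r_i != 0:
--                 cake[r_i] = cake[r_i - 1]
--         else:
--             continue
--     return cake
-- ===== SOURCE B (Python) =====
-- def handle_q_m_row(cake):
--     # Segment run-length expansion: repeatedly locate the next anchor row
--     # (one without '?') and emit the current anchor replicated over the whole
--     # '?'-block, jumping anchor to anchor; write the result back in place.
--     out = []
--     i, n = 0, len(cake)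
--     while i < n:
--         j = next((j for j in range(i + 1, n) if '?' not in cake[j]), n)
--         out += [cake[i]] * (j - i)
--         i = j
--     cake[:] = out
--     return cake
-- ===== Notes on version B (the rewrite author's own statement) =====
-- stated objective: alternative
-- what changed: Replaces A's per-row in-place carry loop (cake[i]=cake[i-1]) with block-wise run-length expansion: repeatedly find the next anchor row without '?' and append the current anchor replicated across the whole '?'-block, consuming the list segment by segment.
import Mathlib
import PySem

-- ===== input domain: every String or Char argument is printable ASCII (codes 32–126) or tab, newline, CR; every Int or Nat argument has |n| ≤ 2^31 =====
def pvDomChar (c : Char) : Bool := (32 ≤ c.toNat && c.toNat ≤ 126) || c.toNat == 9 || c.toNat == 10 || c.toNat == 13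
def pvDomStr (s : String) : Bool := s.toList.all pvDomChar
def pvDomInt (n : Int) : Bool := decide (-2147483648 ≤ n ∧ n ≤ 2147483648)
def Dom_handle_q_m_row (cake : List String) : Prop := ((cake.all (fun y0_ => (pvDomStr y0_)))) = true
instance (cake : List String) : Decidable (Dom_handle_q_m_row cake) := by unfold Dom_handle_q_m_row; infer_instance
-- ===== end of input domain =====

-- B replaces A's per-row in-place carry loop by block-wise run-length expansion over anchor
-- segments (objective: alternative). Both Pythons mutate `cake` in place and return it; the
-- final contents are identical, so the return-value equivalence covers the mutation as well.

-- ===== PORT A =====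
-- A: for r_i, r in enumerate(cake): if '?' in r and r_i != 0: cake[r_i] = cake[r_i-1]
-- (live reads of the mutated list; every index is in range, so getD's default is never used)
def handle_q_m_row (cake : List String) : List String :=
  (List.range cake.length).foldl
    (fun acc r_i =>
      let r := acc.getD r_i ""
      if PySem.Str.isIn "?" r then
        if r_i ≠ 0 then acc.set r_i (acc.getD (r_i - 1) "") else acc
      else acc)
    cake

-- ===== PORT B =====
-- j = next((j for j in range(i + 1, n) if '?' not in cake[j]), n)
def pvFindJIdx (cake : List String) (i : Nat) : Nat :=
  match (List.range' (i + 1) (cake.length - (i + 1))).find?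
      (fun j => !(PySem.Str.isIn "?" (cake.getD j ""))) with
  | some j => j
  | none => cake.length

-- termination fact the loop below cites: the anchor index strictly advances
lemma pvFindJIdx_gt (cake : List String) (i : Nat) (h : i < cake.length) :
    i < pvFindJIdx cake i := by
  unfold pvFindJIdx
  cases hf : (List.range' (i + 1) (cake.length - (i + 1))).find?
      (fun j => !(PySem.Str.isIn "?" (cake.getD j ""))) with
  | none => simpa using h
  | some j =>
    simp only
    have := (List.mem_range'_1.mp (List.mem_of_find?_eq_some hf)).1
    omega

-- while i < n: j = …; out += [cake[i]] * (j - i); i = j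
def pvLoop (cake : List String) (out : List String) (i : Nat) : List String :=
  if h : i < cake.length then
    let j := pvFindJIdx cake i
    pvLoop cake (out ++ List.replicate (j - i) (cake.getD i "")) j
  else out
termination_by cake.length - i
decreasing_by
  have := pvFindJIdx_gt cake i h
  omega

def handle_q_m_row_alt (cake : List String) : List String :=
  pvLoop cake [] 0

-- ===== PRECONDITION & SPEC =====
def Spec_handle_q_m_row (cake : List String) (out : List String) : Prop := out = handle_q_m_row_alt cake
instance (cake : List String) (out : List String) : Decidable (Spec_handle_q_m_row cake out) := by unfold Spec_handle_q_m_row; infer_instance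

-- ===== CLAIM (what is proved, stated in full; the proofs are below) =====
def Claim_equal_handle_q_m_row : Prop := ∀ (cake : List String), Dom_handle_q_m_row cake → Spec_handle_q_m_row cake (handle_q_m_row cake)

-- ===== LEMMAS AND PROOFS =====

-- the propagated-fill function both ports compute, used as the bridge in the proofs
def pvFill (prev : String) : List String → List String
  | [] => []
  | cur :: rest =>
      let nxt := if PySem.Str.isIn "?" cur then prev else cur
      nxt :: pvFill nxt rest

lemma find?_congr' {α : Type} (p q : α → Bool) (l : List α)
    (h : ∀ x ∈ l, p x = q x) : l.find? p = l.find? q := by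
  induction l with
  | nil => rfl
  | cons a t ih =>
    have ha := h a (by simp)
    by_cases hp : p a = true
    · rw [List.find?_cons_of_pos hp, List.find?_cons_of_pos (ha ▸ hp)]
    · rw [List.find?_cons_of_neg hp,
        List.find?_cons_of_neg (by rw [← ha]; exact hp)]
      exact ih (fun x hx => h x (by simp [hx]))

-- proof-side mirror of the loop on the suffix cake.drop i
def pvFindJ (rows : List String) : Nat :=
  match (List.range' 1 (rows.length - 1)).find?
      (fun j => !(PySem.Str.isIn "?" (rows.getD j ""))) with
  | some j => j
  | none => rows.length

lemma pvFindJ_pos (rows : List String) : rows ≠ [] → 1 ≤ pvFindJ rows := by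
  intro h
  unfold pvFindJ
  cases hf : (List.range' 1 (rows.length - 1)).find?
      (fun j => !(PySem.Str.isIn "?" (rows.getD j ""))) with
  | none =>
    simp only
    exact List.length_pos_iff.mpr h
  | some j =>
    simp only
    exact (List.mem_range'_1.mp (List.mem_of_find?_eq_some hf)).1

def pvSegLoop (out : List String) (rows : List String) : List String :=
  if _h : rows.isEmpty then out
  else
    let j := pvFindJ rows
    pvSegLoop (out ++ List.replicate j (rows.getD 0 "")) (rows.drop j)
termination_by rows.length
decreasing_by
  have hne : rows ≠ [] := by simpa [List.isEmpty_iff] using _h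
  have h1 : 1 ≤ pvFindJ rows := pvFindJ_pos rows hne
  have h0 : 0 < rows.length := List.length_pos_iff.mpr hne
  simp only [List.length_drop]
  omega

lemma pvSegLoop_nil (out : List String) : pvSegLoop out [] = out := by
  rw [pvSegLoop]; rfl

lemma pvSegLoop_cons (out : List String) (r0 : String) (rest : List String) :
    pvSegLoop out (r0 :: rest)
      = pvSegLoop (out ++ List.replicate (pvFindJ (r0 :: rest)) r0)
          ((r0 :: rest).drop (pvFindJ (r0 :: rest))) := by
  rw [pvSegLoop]
  simp

-- the find over r0::c::cs with c dirty equals the find over r0::cs, shifted by one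
lemma pvFindJ_shift (r0 c : String) (cs : List String)
    (hc : PySem.Str.isIn "?" c = true) :
    pvFindJ (r0 :: c :: cs) = pvFindJ (r0 :: cs) + 1 := by
  unfold pvFindJ
  have hlen : (r0 :: c :: cs).length - 1 = cs.length + 1 := by simp
  have hlen' : (r0 :: cs).length - 1 = cs.length := by simp
  have hc2 : PySem.Chars.isIn ['?'] c.toList = true := by simpa using hc
  rw [hlen, hlen', List.range'_succ,
    List.find?_cons_of_neg (by simp [hc2]),
    (List.map_add_range' (a:=1) (s:=1) (n:=cs.length) 1).symm, List.find?_map]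
  have hcong : (List.range' 1 cs.length).find?
        ((fun j => !(PySem.Str.isIn "?" ((r0 :: c :: cs).getD j ""))) ∘ (1 + ·))
      = (List.range' 1 cs.length).find?
        (fun j => !(PySem.Str.isIn "?" ((r0 :: cs).getD j ""))) := by
    apply find?_congr'
    intro x hx
    obtain ⟨h1, _⟩ := List.mem_range'_1.mp hx
    obtain ⟨k, rfl⟩ := Nat.exists_eq_add_of_le h1
    show (!(PySem.Str.isIn "?" ((r0 :: c :: cs).getD (1 + (1 + k)) "")))
        = (!(PySem.Str.isIn "?" ((r0 :: cs).getD (1 + k) "")))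
    have e1 : 1 + (1 + k) = (k + 1) + 1 := by omega
    have e2 : 1 + k = k + 1 := by omega
    rw [e1, e2, List.getD_cons_succ, List.getD_cons_succ, List.getD_cons_succ]
  rw [hcong]
  cases hf : (List.range' 1 cs.length).find?
      (fun j => !(PySem.Str.isIn "?" ((r0 :: cs).getD j ""))) with
  | none => simp
  | some j => simp [Nat.add_comm]

lemma pvFindJ_clean (r0 c : String) (cs : List String)
    (hc : PySem.Str.isIn "?" c = false) :
    pvFindJ (r0 :: c :: cs) = 1 := by
  unfold pvFindJ
  have hlen : (r0 :: c :: cs).length - 1 = cs.length + 1 := by simp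
  have hc2 : PySem.Chars.isIn ['?'] c.toList = false := by simpa using hc
  rw [hlen, List.range'_succ,
    List.find?_cons_of_pos (by simp [hc2])]

-- consuming one dirty row keeps the loop in the same anchor block
lemma segLoop_shift (out : List String) (r0 c : String) (cs : List String)
    (hc : PySem.Str.isIn "?" c = true) :
    pvSegLoop out (r0 :: c :: cs) = pvSegLoop (out ++ [r0]) (r0 :: cs) := by
  rw [pvSegLoop_cons out r0 (c :: cs), pvSegLoop_cons (out ++ [r0]) r0 cs,
    pvFindJ_shift r0 c cs hc]
  obtain ⟨k, hk⟩ := Nat.exists_eq_add_of_le (pvFindJ_pos (r0 :: cs) (by simp))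
  have hd : (r0 :: c :: cs).drop (pvFindJ (r0 :: cs) + 1)
      = (r0 :: cs).drop (pvFindJ (r0 :: cs)) := by
    rw [hk]
    have e1 : 1 + k + 1 = (k + 1) + 1 := by omega
    have e2 : 1 + k = k + 1 := by omega
    rw [e1, e2]
    simp [List.drop_succ_cons]
  have ho : out ++ List.replicate (pvFindJ (r0 :: cs) + 1) r0
      = (out ++ [r0]) ++ List.replicate (pvFindJ (r0 :: cs)) r0 := by
    simp [List.replicate_succ]
  rw [hd, ho]

lemma segLoop_fill (cs : List String) : ∀ (out : List String) (r0 : String),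
    pvSegLoop out (r0 :: cs) = out ++ r0 :: pvFill r0 cs := by
  induction cs with
  | nil =>
    intro out r0
    have hj : pvFindJ [r0] = 1 := by unfold pvFindJ; simp
    rw [pvSegLoop_cons, hj]
    simp [pvSegLoop_nil, pvFill]
  | cons c cs ih =>
    intro out r0
    by_cases hc : PySem.Str.isIn "?" c = true
    · rw [segLoop_shift out r0 c cs hc, ih (out ++ [r0]) r0]
      have hf : pvFill r0 (c :: cs) = r0 :: pvFill r0 cs := by
        simp only [pvFill]; rw [if_pos hc]
      simp [hf]
    · have hc' : PySem.Str.isIn "?" c = false := by simpa using hc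
      rw [pvSegLoop_cons, pvFindJ_clean r0 c cs hc']
      simp only [List.drop_succ_cons, List.drop_zero, List.replicate_one]
      rw [ih (out ++ [r0]) c]
      have hc2 : PySem.Chars.isIn ['?'] c.toList = false := by simpa using hc'
      have hf : pvFill r0 (c :: cs) = c :: pvFill c cs := by
        simp only [pvFill]; rw [if_neg (by simp [hc2])]
      simp [hf]


-- bridge: the index loop is the suffix loop
lemma pvFindJIdx_eq (cake : List String) (i : Nat) (hi : i < cake.length) :
    pvFindJIdx cake i = i + pvFindJ (cake.drop i) := by
  unfold pvFindJIdx pvFindJ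
  have hlen : (cake.drop i).length - 1 = cake.length - (i + 1) := by
    simp only [List.length_drop]; omega
  rw [hlen,
    show List.range' (i + 1) (cake.length - (i + 1))
        = (List.range' 1 (cake.length - (i + 1))).map (i + ·) from
      (List.map_add_range' (a:=i) (s:=1) (n:=cake.length - (i + 1)) 1).symm,
    List.find?_map]
  have hcong : (List.range' 1 (cake.length - (i + 1))).find?
        ((fun j => !(PySem.Str.isIn "?" (cake.getD j ""))) ∘ (i + ·))
      = (List.range' 1 (cake.length - (i + 1))).find?
        (fun j => !(PySem.Str.isIn "?" ((cake.drop i).getD j ""))) := by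
    apply find?_congr'
    intro x _
    show (!(PySem.Str.isIn "?" (cake.getD (i + x) "")))
        = (!(PySem.Str.isIn "?" ((cake.drop i).getD x "")))
    simp [List.getD, List.getElem?_drop]
  rw [hcong]
  cases hf : (List.range' 1 (cake.length - (i + 1))).find?
      (fun j => !(PySem.Str.isIn "?" ((cake.drop i).getD j ""))) with
  | none => simp only [Option.map_none]; simp only [List.length_drop]; omega
  | some j => simp

lemma pvLoop_eq (cake : List String) : ∀ (m i : Nat), cake.length - i ≤ m →
    ∀ (out : List String), pvLoop cake out i = pvSegLoop out (cake.drop i) := by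
  intro m
  induction m with
  | zero =>
    intro i hm out
    have hge : cake.length ≤ i := by omega
    rw [pvLoop, dif_neg (Nat.not_lt.mpr hge), List.drop_eq_nil_of_le hge, pvSegLoop_nil]
  | succ m ih =>
    intro i hm out
    by_cases h : i < cake.length
    · have hdropcons : cake.drop i = cake[i] :: cake.drop (i + 1) :=
        List.drop_eq_getElem_cons h
      have hne : cake.drop i ≠ [] := by rw [hdropcons]; exact List.cons_ne_nil _ _
      have hF1 : 1 ≤ pvFindJ (cake.drop i) := pvFindJ_pos _ hne
      have hgd : cake.getD i "" = cake[i] := by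
        simp [List.getD, List.getElem?_eq_getElem h]
      have hdd : (cake.drop i).drop (pvFindJ (cake.drop i))
          = cake.drop (i + pvFindJ (cake.drop i)) := by
        rw [List.drop_drop]
      have hstep : pvSegLoop out (cake.drop i)
          = pvSegLoop (out ++ List.replicate (pvFindJ (cake.drop i)) (cake.getD i ""))
              (cake.drop (i + pvFindJ (cake.drop i))) := by
        conv_lhs => rw [hdropcons, pvSegLoop_cons, ← hdropcons]
        rw [hdd, hgd]
      rw [pvLoop, dif_pos h]
      show pvLoop cake
          (out ++ List.replicate (pvFindJIdx cake i - i) (cake.getD i ""))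
          (pvFindJIdx cake i) = pvSegLoop out (cake.drop i)
      rw [pvFindJIdx_eq cake i h,
        show i + pvFindJ (cake.drop i) - i = pvFindJ (cake.drop i) from by omega,
        ih (i + pvFindJ (cake.drop i)) (by omega), hstep]
    · rw [pvLoop, dif_neg h, List.drop_eq_nil_of_le (by omega), pvSegLoop_nil]

-- ----- A-side proof (A computes the same propagated fill) -----

-- A's loop body, named for the proofs
def pvStep (acc : List String) (r_i : Nat) : List String :=
  if PySem.Str.isIn "?" (acc.getD r_i "") then
    if r_i ≠ 0 then acc.set r_i (acc.getD (r_i - 1) "") else acc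
  else acc

lemma pvStep_zero (acc : List String) : pvStep acc 0 = acc := by
  simp [pvStep]

lemma getD_append_length (pre : List String) (c : String) (cs : List String) :
    (pre ++ c :: cs).getD pre.length "" = c := by
  simp [List.getD]

lemma getD_append_last (pre : List String) (hp : pre ≠ []) (t : List String) :
    (pre ++ t).getD (pre.length - 1) "" = pre.getLast hp := by
  have hlt : pre.length - 1 < pre.length :=
    Nat.sub_lt (List.length_pos_iff.mpr hp) Nat.one_pos
  simp [List.getD, List.getElem?_append_left hlt, List.getElem?_eq_getElem hlt,
    List.getLast_eq_getElem]

lemma set_append_length (pre : List String) (c v : String) (cs : List String) :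
    (pre ++ c :: cs).set pre.length v = pre ++ v :: cs := by
  simp

lemma fill_loop (t : List String) : ∀ (pre : List String) (hp : pre ≠ []),
    ((List.range t.length).map (· + pre.length)).foldl pvStep (pre ++ t)
      = pre ++ pvFill (pre.getLast hp) t := by
  induction t with
  | nil => intro pre hp; simp [pvFill]
  | cons c cs ih =>
    intro pre hp
    have hrange : List.range (c :: cs).length
        = 0 :: (List.range cs.length).map (· + 1) := by
      simpa [Nat.succ_eq_add_one] using List.range_succ_eq_map (n := cs.length)
    rw [hrange]
    set nxt : String := if PySem.Str.isIn "?" c then pre.getLast hp else c with hnxt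
    have hstep : pvStep (pre ++ c :: cs) pre.length = pre ++ nxt :: cs := by
      have hne : pre.length ≠ 0 := by
        simpa [List.length_eq_zero_iff] using hp
      unfold pvStep
      rw [getD_append_length, getD_append_last pre hp, set_append_length]
      by_cases hq : PySem.Str.isIn "?" c
      · rw [if_pos hq, if_pos hne, hnxt, if_pos hq]
      · rw [if_neg hq, hnxt, if_neg hq]
    have hmap : ((List.range cs.length).map (· + 1)).map (· + pre.length)
        = (List.range cs.length).map (· + (pre ++ [nxt]).length) := by
      simp only [List.map_map, List.length_append, List.length_cons, List.length_nil]
      refine List.map_congr_left ?_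
      intro j _
      simp [Function.comp]
      omega
    have happ : pre ++ nxt :: cs = (pre ++ [nxt]) ++ cs := by simp
    have hlast : (pre ++ [nxt]).getLast (by simp) = nxt := by
      simp
    calc ((0 :: (List.range cs.length).map (· + 1)).map (· + pre.length)).foldl
            pvStep (pre ++ c :: cs)
        = (((List.range cs.length).map (· + 1)).map (· + pre.length)).foldl
            pvStep (pvStep (pre ++ c :: cs) pre.length) := by
          simp [List.foldl_cons]
      _ = ((List.range cs.length).map (· + (pre ++ [nxt]).length)).foldl
            pvStep ((pre ++ [nxt]) ++ cs) := by
          rw [hstep, hmap, happ]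
      _ = (pre ++ [nxt]) ++ pvFill ((pre ++ [nxt]).getLast (by simp)) cs := by
          exact ih (pre ++ [nxt]) (by simp)
      _ = pre ++ pvFill (pre.getLast hp) (c :: cs) := by
          rw [hlast]
          simp [pvFill, hnxt]

-- ===== VERDICT (by name: the statement is the Claim_ definition above) =====
theorem handle_q_m_row_spec : Claim_equal_handle_q_m_row := by
  intro cake _
  unfold Spec_handle_q_m_row
  cases cake with
  | nil =>
    show handle_q_m_row [] = handle_q_m_row_alt []
    unfold handle_q_m_row_alt
    rw [pvLoop, dif_neg (by simp)]
    simp [handle_q_m_row]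
  | cons h t =>
    have hB : handle_q_m_row_alt (h :: t) = h :: pvFill h t := by
      unfold handle_q_m_row_alt
      rw [pvLoop_eq (h :: t) (h :: t).length 0 (by omega) [], List.drop_zero]
      simpa using segLoop_fill t [] h
    rw [hB]
    show (List.range (h :: t).length).foldl pvStep (h :: t) = _
    have hrange : List.range (h :: t).length
        = 0 :: (List.range t.length).map (· + 1) := by
      simpa [Nat.succ_eq_add_one] using List.range_succ_eq_map (n := t.length)
    rw [hrange]
    have h1 : (List.range t.length).map (· + 1)
        = (List.range t.length).map (· + ([h] : List String).length) := by simp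
    calc (0 :: (List.range t.length).map (· + 1)).foldl pvStep (h :: t)
        = ((List.range t.length).map (· + ([h] : List String).length)).foldl
            pvStep ([h] ++ t) := by
          rw [List.foldl_cons, pvStep_zero, h1]; rfl
      _ = [h] ++ pvFill (([h] : List String).getLast (by simp)) t :=
          fill_loop t [h] (by simp)
      _ = h :: pvFill h t := by simp
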